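-- pv_equiv track=rewrite | github.com/shriramt124/Ecommerce-listing-automation | listing_generator/browse_node_mapper.py | match_product_to_category
-- ===== SOURCE A (Python) =====
-- from typing import Any, Dict, List, Optional
--
-- def match_product_to_category(product: Dict[str, Any], csv_categories: Dict[str, str]) -> Optional[str]:
--     """
--     Try to match a product to a keyword CSV based on its la_cat or title.
--     Returns the best matching CSV path, or None.
--     """
--     la_cat = str(product.get('la_cat', '') or '').lower()
--     title = str(product.get('title', '') or '').lower()
--
--     best_match = None
--     best_score = 0
--
--     for csv_path, category in csv_categories.items():
--         cat_lower = category.lower()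
--         cat_words = set(cat_lower.replace('>', ' ').split())
--
--         score = 0
--         # Check overlap with la_cat
--         if la_cat:
--             la_words = set(la_cat.replace('>', ' ').replace(',', ' ').split())
--             overlap = cat_words & la_words
--             score += len(overlap) * 2
--
--         # Check overlap with title
--         title_words = set(title.split())
--         overlap = cat_words & title_words
--         score += len(overlap)
--
--         if score > best_score:
--             best_score = score
--             best_match = csv_path
--
--     return best_match
-- ===== SOURCE B (Python) =====
-- def match_product_to_category(product, csv_categories):
--     la_cat = str(product.get('la_cat', '') or '').lower()
--     title = str(product.get('title', '') or '').lower()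
--
--     # Inverted index: flatten the categories into (word, path) postings once,
--     # then group them into word -> [paths].
--     postings = [(w, path)
--                 for path, category in csv_categories.items()
--                 for w in set(category.lower().replace('>', ' ').split())]
--     index = {}
--     for w, path in postings:
--         index[w] = index.get(w, []) + [path]
--
--     # Drive the scoring from the query words: a la_cat word is worth two
--     # hits for every path it indexes, a title word one hit.
--     hits = []
--     for w in set(la_cat.replace('>', ' ').replace(',', ' ').split()):
--         hits += 2 * index.get(w, [])
--     for w in set(title.split()):
--         hits += index.get(w, [])
--     scores = {}
--     for p in hits:
--         scores[p] = scores.get(p, 0) + 1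
--
--     # First path whose hit count strictly beats the running best (None if all zero).
--     best_match, best_score = None, 0
--     for path in csv_categories:
--         s = scores.get(path, 0)
--         if s > best_score:
--             best_match, best_score = path, s
--     return best_match
-- ===== Notes on version B (the rewrite author's own statement) =====
-- stated objective: alternative
-- what changed: B replaces A's per-category set intersections by an inverted index: the categories are flattened once into (word, path) postings grouped into word->paths, scoring is driven from the query words (each la_cat word contributes 2 hits, each title word 1 hit, tallied per path in a counter dict), and the winner is the first path whose tally beats the running best.
import Mathlib
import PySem

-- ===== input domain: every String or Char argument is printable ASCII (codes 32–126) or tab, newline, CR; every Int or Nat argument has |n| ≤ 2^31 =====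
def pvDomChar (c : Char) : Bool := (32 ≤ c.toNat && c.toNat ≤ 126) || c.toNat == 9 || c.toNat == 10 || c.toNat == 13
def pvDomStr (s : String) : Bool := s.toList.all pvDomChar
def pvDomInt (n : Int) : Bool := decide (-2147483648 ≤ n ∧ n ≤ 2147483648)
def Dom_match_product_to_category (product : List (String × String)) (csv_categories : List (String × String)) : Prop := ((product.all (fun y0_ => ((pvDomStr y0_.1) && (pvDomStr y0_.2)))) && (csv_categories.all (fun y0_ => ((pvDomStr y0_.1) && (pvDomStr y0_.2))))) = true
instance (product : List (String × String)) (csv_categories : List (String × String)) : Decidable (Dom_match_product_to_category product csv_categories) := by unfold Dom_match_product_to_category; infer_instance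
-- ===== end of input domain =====

-- B rewrite: instead of A's per-category set intersections, B flattens the categories once into
-- (word, path) postings grouped into an inverted index word -> [paths], drives the scoring from the
-- query words (a la_cat word is worth 2 hits per indexed path, a title word 1 hit) tallied per path,
-- and returns the first path whose tally beats the running best.  Objective: alternative algorithm.

-- ===== PORT A =====
def match_product_to_category (product : List (String × String)) (csv_categories : List (String × String)) : Option String :=
  let pd := PySem.Dict.ofList product
  let la_cat := PySem.Str.lower (pd.getD "la_cat" "")    -- str(… or '') is the identity on the str values here
  let title := PySem.Str.lower (pd.getD "title" "")
  ((PySem.Dict.ofList csv_categories).items.foldl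
    (fun (acc : Option String × Int) pc =>
      let cat_lower := PySem.Str.lower pc.2
      let cat_words := PySem.Set.ofList (PySem.Str.split₀ (PySem.Str.replace cat_lower ">" " "))
      let score0 : Int :=
        if la_cat ≠ "" then
          let la_words := PySem.Set.ofList (PySem.Str.split₀
            (PySem.Str.replace (PySem.Str.replace la_cat ">" " ") "," " "))
          PySem.Set.len (PySem.Set.inter cat_words la_words) * 2
        else 0
      let title_words := PySem.Set.ofList (PySem.Str.split₀ title)
      let score := score0 + PySem.Set.len (PySem.Set.inter cat_words title_words)
      if score > acc.2 then (some pc.1, score) else acc)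
    ((none : Option String), (0 : Int))).1

-- ===== PORT B =====
def match_product_to_category_alt (product : List (String × String)) (csv_categories : List (String × String)) : Option String :=
  let pd := PySem.Dict.ofList product
  let la_cat := PySem.Str.lower (pd.getD "la_cat" "")
  let title := PySem.Str.lower (pd.getD "title" "")
  let cd := PySem.Dict.ofList csv_categories
  let postings := cd.items.flatMap (fun pc =>
    (PySem.Set.ofList (PySem.Str.split₀ (PySem.Str.replace (PySem.Str.lower pc.2) ">" " "))).map
      (fun w => (w, pc.1)))
  let index := postings.foldl
    (fun (d : PySem.Dict String (List String)) p => d.modify p.1 [] (· ++ [p.2])) PySem.Dict.empty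
  let la_words := PySem.Set.ofList (PySem.Str.split₀
    (PySem.Str.replace (PySem.Str.replace la_cat ">" " ") "," " "))
  let title_words := PySem.Set.ofList (PySem.Str.split₀ title)
  let hits1 := la_words.foldl (fun h w => h ++ (index.getD w [] ++ index.getD w [])) []  -- hits += 2 * index.get(w, [])
  let hits := title_words.foldl (fun h w => h ++ index.getD w []) hits1
  let scores := hits.foldl (fun (d : PySem.Dict String Int) p => d.modify p 0 (· + 1)) PySem.Dict.empty
  (cd.keys.foldl
    (fun (acc : Option String × Int) path =>
      if scores.getD path 0 > acc.2 then (some path, scores.getD path 0) else acc)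
    ((none : Option String), (0 : Int))).1

-- ===== PRECONDITION & SPEC =====
def Spec_match_product_to_category (product : List (String × String)) (csv_categories : List (String × String)) (out : Option String) : Prop := out = match_product_to_category_alt product csv_categories
instance (product : List (String × String)) (csv_categories : List (String × String)) (out : Option String) : Decidable (Spec_match_product_to_category product csv_categories out) := by unfold Spec_match_product_to_category; infer_instance

-- ===== CLAIM (what is proved, stated in full; the proofs are below) =====
def Claim_equal_match_product_to_category : Prop := ∀ (product : List (String × String)) (csv_categories : List (String × String)), Dom_match_product_to_category product csv_categories → Spec_match_product_to_category product csv_categories (match_product_to_category product csv_categories)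

-- ===== LEMMAS AND PROOFS =====

-- the word set of one category (duplicate-free by construction)
def pvW (c : String) : List String :=
  PySem.Set.ofList (PySem.Str.split₀ (PySem.Str.replace (PySem.Str.lower c) ">" " "))

-- ---- B-side abbreviations (definitionally the pieces of the B port) ----
def pvLaW (la_cat : String) : List String :=
  PySem.Set.ofList (PySem.Str.split₀ (PySem.Str.replace (PySem.Str.replace la_cat ">" " ") "," " "))

def pvTiW (title : String) : List String := PySem.Set.ofList (PySem.Str.split₀ title)

def pvPostings (l : List (String × String)) : List (String × String) :=
  l.flatMap (fun pc => (pvW pc.2).map (fun w => (w, pc.1)))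

def pvIndex (l : List (String × String)) : PySem.Dict String (List String) :=
  (pvPostings l).foldl (fun d p => d.modify p.1 [] (· ++ [p.2])) PySem.Dict.empty

def pvHits (la_cat title : String) (l : List (String × String)) : List String :=
  (pvTiW title).foldl (fun h w => h ++ (pvIndex l).getD w [])
    ((pvLaW la_cat).foldl (fun h w => h ++ ((pvIndex l).getD w [] ++ (pvIndex l).getD w [])) [])

-- |u ∩ v| counted from either side, for duplicate-free lists.
lemma pv_countP_comm (s t : List String) (hs : s.Nodup) (ht : t.Nodup) :
    s.countP (fun x => t.contains x) = t.countP (fun x => s.contains x) := by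
  have key : ∀ (u v : List String), u.Nodup →
      u.countP (fun x => v.contains x) = (u.toFinset ∩ v.toFinset).card := by
    intro u v hu
    have h1 : (u.filter (fun x => v.contains x)).toFinset = u.toFinset ∩ v.toFinset := by
      ext a; simp
    rw [List.countP_eq_length_filter, ← List.toFinset_card_of_nodup (hu.filter _), h1]
  rw [key s t hs, key t s ht, Finset.inter_comm]

-- A's per-category score in countP form.
lemma pv_score (la_cat title category : String) :
    (if la_cat ≠ "" then
        PySem.Set.len (PySem.Set.inter (pvW category) (pvLaW la_cat)) * 2
      else 0)
    + PySem.Set.len (PySem.Set.inter (pvW category) (pvTiW title))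
    = 2 * (((pvLaW la_cat).countP (fun w => (pvW category).contains w) : Nat) : Int)
      + (((pvTiW title).countP (fun w => (pvW category).contains w) : Nat) : Int) := by
  set c := pvW category with hc
  have hlen : ∀ (u v : List String), u.Nodup → v.Nodup →
      PySem.Set.len (PySem.Set.inter u v) = ((v.countP (fun w => u.contains w) : Nat) : Int) := by
    intro u v hu hv
    simp only [PySem.Set.len, PySem.Set.inter, PySem.Set.contains_eq_listContains,
      ← List.countP_eq_length_filter]
    rw [pv_countP_comm u v hu hv]
  have hcn : c.Nodup := PySem.Set.nodup_ofList _
  have htn : (pvTiW title).Nodup := PySem.Set.nodup_ofList _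
  by_cases h : la_cat = ""
  · subst h
    have : pvLaW "" = ([] : List String) := by decide
    rw [this, if_neg (by simp), hlen c _ hcn htn]
    simp
  · have h1n : (pvLaW la_cat).Nodup := PySem.Set.nodup_ofList _
    rw [if_pos h, hlen c _ hcn h1n, hlen c _ hcn htn]
    ring

-- a 0/1-valued map sums to a countP (Nat version, with a pointwise hypothesis)
lemma pv_sum_ite {α : Type} (l : List α) (q : α → Bool) (g : α → Nat)
    (h : ∀ x ∈ l, g x = if q x then 1 else 0) : (l.map g).sum = l.countP q := by
  induction l with
  | nil => rfl
  | cons a t ih =>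
    rw [List.map_cons, List.sum_cons, List.countP_cons, ih (fun x hx => h x (List.mem_cons_of_mem a hx)),
      h a List.mem_cons_self]
    by_cases hq : q a = true <;> simp [hq, Nat.add_comm]

-- with duplicate-free keys, countP over pairs keyed at pc.1 sees exactly the entry pc
lemma pv_countP_fst (l : List (String × String)) (pc : String × String) (hpc : pc ∈ l)
    (hnd : (l.map Prod.fst).Nodup) (q : String → Bool) :
    l.countP (fun qc => qc.1 == pc.1 && q qc.2) = if q pc.2 then 1 else 0 := by
  induction l with
  | nil => cases hpc
  | cons a t ih =>
    rw [List.map_cons, List.nodup_cons] at hnd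
    rw [List.countP_cons]
    rcases List.mem_cons.mp hpc with rfl | hpt
    · have ht : t.countP (fun qc => qc.1 == pc.1 && q qc.2) = 0 := by
        rw [List.countP_eq_zero]
        intro qc hqc
        have : qc.1 ∈ t.map Prod.fst := List.mem_map.mpr ⟨qc, hqc, rfl⟩
        simp only [Bool.and_eq_true, beq_iff_eq, not_and]
        intro h1 _; exact hnd.1 (h1 ▸ this)
      rw [ht]; simp
    · have hne : a.1 ≠ pc.1 := by
        intro h
        exact hnd.1 (h ▸ List.mem_map.mpr ⟨pc, hpt, rfl⟩)
      rw [ih hpt hnd.2]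
      simp [hne]

-- what the inverted index stores under w: the paths of the categories containing w
lemma pv_plist (l : List (String × String)) (w : String) :
    (pvIndex l).getD w [] = ((pvPostings l).filter (fun x => x.1 == w)).map (fun x => x.2) := by
  unfold pvIndex
  rw [PySem.Dict.getD_foldl_modify_append]
  rw [PySem.Dict.getD_empty]
  rfl

-- how often path pc.1 occurs in the index list at word w: once if w is a word of pc's
-- category, never otherwise (the dict's keys are duplicate-free)
lemma pv_plist_count (l : List (String × String)) (w : String) (pc : String × String)
    (hpc : pc ∈ l) (hnd : (l.map Prod.fst).Nodup) :
    ((pvIndex l).getD w []).count pc.1 = if w ∈ pvW pc.2 then 1 else 0 := by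
  rw [pv_plist]
  unfold pvPostings
  simp only [List.count_eq_countP, List.countP_map, List.countP_filter, List.countP_flatMap,
    Function.comp_def]
  have hper : ∀ qc ∈ l,
      (fun x : String × String => List.countP (fun x_1 => x.1 == pc.1 && x_1 == w) (pvW x.2)) qc
      = if (qc.1 == pc.1 && decide (w ∈ pvW qc.2)) then 1 else 0 := by
    intro qc _
    by_cases h1 : qc.1 = pc.1
    · simp only [h1, beq_self_eq_true, Bool.true_and]
      have hn : (pvW qc.2).Nodup := PySem.Set.nodup_ofList _
      rw [← List.count_eq_countP, hn.count]
      simp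
    · simp [h1]
  rw [pv_sum_ite l (fun qc => qc.1 == pc.1 && decide (w ∈ pvW qc.2))
      (fun x : String × String => List.countP (fun x_1 => x.1 == pc.1 && x_1 == w) (pvW x.2)) hper,
    pv_countP_fst l pc hpc hnd (fun c => decide (w ∈ pvW c))]
  simp

-- counting one path through an 'hits += …' accumulation loop
lemma pv_count_hits {k : Nat} (ws : List String) (g : String → List String) (h0 : List String)
    (p : String) (q : String → Bool) (hg : ∀ w ∈ ws, (g w).count p = if q w then k else 0) :
    (ws.foldl (fun h w => h ++ g w) h0).count p = h0.count p + k * ws.countP q := by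
  induction ws generalizing h0 with
  | nil => simp
  | cons w t ih =>
    rw [List.foldl_cons, ih (h0 ++ g w) (fun x hx => hg x (List.mem_cons_of_mem w hx)),
      List.count_append, hg w List.mem_cons_self, List.countP_cons]
    by_cases hq : q w = true
    · simp [hq]; ring
    · simp [hq]

-- B's tally of a path present in the dict equals A's weighted-overlap score
lemma pv_score_eq (la_cat title : String) (l : List (String × String))
    (hnd : (l.map Prod.fst).Nodup) (pc : String × String) (hpc : pc ∈ l) :
    (if la_cat ≠ "" then
        PySem.Set.len (PySem.Set.inter (pvW pc.2) (pvLaW la_cat)) * 2 else 0)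
      + PySem.Set.len (PySem.Set.inter (pvW pc.2) (pvTiW title))
    = (((pvHits la_cat title l).count pc.1 : Nat) : Int) := by
  have hq : ∀ w, ((pvIndex l).getD w []).count pc.1 = if decide (w ∈ pvW pc.2) then 1 else 0 := by
    intro w; rw [pv_plist_count l w pc hpc hnd]; simp
  have h2 : ∀ w, ((pvIndex l).getD w [] ++ (pvIndex l).getD w []).count pc.1
      = if decide (w ∈ pvW pc.2) then 2 else 0 := by
    intro w; rw [List.count_append, hq w]; by_cases h : w ∈ pvW pc.2 <;> simp [h]
  have hhits : (pvHits la_cat title l).count pc.1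
      = 2 * (pvLaW la_cat).countP (fun w => decide (w ∈ pvW pc.2))
        + (pvTiW title).countP (fun w => decide (w ∈ pvW pc.2)) := by
    unfold pvHits
    rw [pv_count_hits (k := 1) _ _ _ _ (fun w => decide (w ∈ pvW pc.2)) (fun w _ => hq w),
      pv_count_hits (k := 2) _ _ _ _ (fun w => decide (w ∈ pvW pc.2)) (fun w _ => h2 w)]
    simp
  have hcontains : ∀ (s : List String),
      s.countP (fun w => (pvW pc.2).contains w) = s.countP (fun w => decide (w ∈ pvW pc.2)) := by
    intro s; apply List.countP_congr; intro a _; simp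
  rw [pv_score la_cat title pc.2, hhits, hcontains, hcontains]
  push_cast
  ring

-- running-best selection: A's fold over the items equals B's fold over the keys with the tallies
lemma pv_main (la_cat title : String) (l : List (String × String))
    (hnd : (l.map Prod.fst).Nodup) :
    (l.foldl (fun (acc : Option String × Int) pc =>
        if ((if la_cat ≠ "" then
              PySem.Set.len (PySem.Set.inter (pvW pc.2) (pvLaW la_cat)) * 2 else 0)
            + PySem.Set.len (PySem.Set.inter (pvW pc.2) (pvTiW title))) > acc.2 then
          (some pc.1,
            (if la_cat ≠ "" then
              PySem.Set.len (PySem.Set.inter (pvW pc.2) (pvLaW la_cat)) * 2 else 0)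
            + PySem.Set.len (PySem.Set.inter (pvW pc.2) (pvTiW title)))
        else acc)
      ((none : Option String), (0 : Int))).1
    = ((l.map Prod.fst).foldl (fun (acc : Option String × Int) path =>
        if ((pvHits la_cat title l).foldl
              (fun (d : PySem.Dict String Int) p => d.modify p 0 (· + 1)) PySem.Dict.empty).getD path 0 > acc.2 then
          (some path,
            ((pvHits la_cat title l).foldl
              (fun (d : PySem.Dict String Int) p => d.modify p 0 (· + 1)) PySem.Dict.empty).getD path 0)
        else acc)
      ((none : Option String), (0 : Int))).1 := by
  rw [← PySem.Dict.counter_eq_foldl]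
  simp only [PySem.Dict.getD_counter]
  rw [List.foldl_map]
  rw [PySem.List.foldl_congr_mem l _
    (fun (acc : Option String × Int) pc =>
      if (((pvHits la_cat title l).count pc.1 : Int) > acc.2) then
        (some pc.1, ((pvHits la_cat title l).count pc.1 : Int)) else acc) _ ?_]
  intro acc pc hpc
  rw [pv_score_eq la_cat title l hnd pc hpc]

-- ===== VERDICT (by name: the statement is the Claim_ definition above) =====
theorem match_product_to_category_spec : Claim_equal_match_product_to_category := by
  intro product csv_categories _
  unfold Spec_match_product_to_category
  unfold match_product_to_category match_product_to_category_alt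
  have hnd := PySem.Dict.nodup_keys_ofList csv_categories
  simp only [PySem.Dict.keys] at hnd ⊢
  generalize PySem.Str.lower ((PySem.Dict.ofList product).getD "la_cat" "") = la_cat
  generalize PySem.Str.lower ((PySem.Dict.ofList product).getD "title" "") = title
  generalize hl : (PySem.Dict.ofList csv_categories).items = l
  rw [hl] at hnd
  exact pv_main la_cat title l hnd
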